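-- pv_equiv track=rewrite | github.com/rajdharmkar/pythoncode | multiplargfn1.py | count
-- ===== SOURCE A (Python) =====
-- def count(a, b):
--     word = False
--     a = " " + a + " "
--     b = " " + b + " "
--
--     result = 0
--
--     for i in range(len(a) - 1):
--         if a[i] == " " and a[i + 1] != " ":
--             word = True
--             result += 1
--         else:
--             word = False
--
--     for i in range(len(b) - 1):
--         if b[i] == " " and b[i + 1] != " ":
--             word = True
--             result += 1
--         else:
--             word = False
--
--     return result
-- ===== SOURCE B (Python) =====
-- def count(a, b):
--     return sum(1 for w in a.split(' ') if w) + sum(1 for w in b.split(' ') if w)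
-- ===== Notes on version B (the rewrite author's own statement) =====
-- stated objective: simpler
-- what changed: B tokenizes each string with split(' ') and counts the non-empty tokens, replacing A's index loop over padded strings that counts space-to-non-space character transitions.
import Mathlib
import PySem

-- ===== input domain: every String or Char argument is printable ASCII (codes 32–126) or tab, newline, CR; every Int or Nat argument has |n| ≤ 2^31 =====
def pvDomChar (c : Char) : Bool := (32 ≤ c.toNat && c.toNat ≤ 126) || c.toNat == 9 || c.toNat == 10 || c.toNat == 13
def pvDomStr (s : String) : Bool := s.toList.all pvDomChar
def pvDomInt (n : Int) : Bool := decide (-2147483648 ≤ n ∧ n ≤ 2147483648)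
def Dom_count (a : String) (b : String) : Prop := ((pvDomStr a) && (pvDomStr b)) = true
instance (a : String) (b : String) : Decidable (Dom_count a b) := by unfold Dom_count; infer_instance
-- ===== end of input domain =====

-- B counts the non-empty tokens of split(' ') on each string instead of A's index loop
-- counting space→non-space transitions over padded copies; objective: simpler.


-- ===== PORT A =====
-- literal transliteration: pad with a space on both sides, then for i in range(len-1)
-- keep state (word, result); indexing a[i] is in range, ported with pyGetD.
def count (a : String) (b : String) : Int :=
  let a' : List Char := [' '] ++ a.toList ++ [' ']      -- a = " " + a + " "
  let b' : List Char := [' '] ++ b.toList ++ [' ']      -- b = " " + b + " "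
  let st1 : Bool × Int :=
    (PySem.List.pyRange 0 ((a'.length : Int) - 1) 1).foldl
      (fun st i =>
        if PySem.List.pyGetD a' i ' ' = ' ' ∧ PySem.List.pyGetD a' (i + 1) ' ' ≠ ' '
        then (true, st.2 + 1) else (false, st.2))
      (false, 0)
  let st2 : Bool × Int :=
    (PySem.List.pyRange 0 ((b'.length : Int) - 1) 1).foldl
      (fun st i =>
        if PySem.List.pyGetD b' i ' ' = ' ' ∧ PySem.List.pyGetD b' (i + 1) ' ' ≠ ' '
        then (true, st.2 + 1) else (false, st.2))
      st1
  st2.2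

-- ===== PORT B =====
def count_alt (a : String) (b : String) : Int :=
  (((PySem.Chars.splitOn a.toList [' ']).countP (fun w => !w.isEmpty) : Nat) : Int)
    + (((PySem.Chars.splitOn b.toList [' ']).countP (fun w => !w.isEmpty) : Nat) : Int)

-- ===== PRECONDITION & SPEC =====
def Spec_count (a : String) (b : String) (out : Int) : Prop := out = count_alt a b
instance (a : String) (b : String) (out : Int) : Decidable (Spec_count a b out) := by unfold Spec_count; infer_instance

-- ===== CLAIM (what is proved, stated in full; the proofs are below) =====
def Claim_equal_count : Prop := ∀ (a : String) (b : String), Dom_count a b → Spec_count a b (count a b)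

-- ===== LEMMAS AND PROOFS =====

-- number of space→non-space adjacent pairs (what A's loop counts on the padded list)
def pairs : List Char → Nat
  | x :: y :: r => (if x = ' ' ∧ y ≠ ' ' then 1 else 0) + pairs (y :: r)
  | _ => 0

-- word count of l, the flag saying whether we are already inside a word
def wcount : Bool → List Char → Nat
  | _, [] => 0
  | b, c :: r => if c = ' ' then wcount false r else (if b then 0 else 1) + wcount true r

theorem pairs_short (l : List Char) (h : l.length ≤ 1) : pairs l = 0 := by
  match l, h with
  | [], _ => rfl
  | [x], _ => rfl

theorem pairs_pad (l : List Char) (p : Char) :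
    pairs (p :: l ++ [' ']) = wcount (decide (p ≠ ' ')) l := by
  induction l generalizing p with
  | nil => simp [pairs, wcount]
  | cons c r ih =>
    show pairs (p :: c :: (r ++ [' '])) = _
    rw [pairs]
    rw [show (c :: (r ++ [' '])) = (c :: r ++ [' ']) from rfl, ih c]
    by_cases hc : c = ' ' <;> by_cases hp : p = ' ' <;>
      simp [wcount, hc, hp]

theorem go_wc (fuel : Nat) (l cur : List Char) (acc : List (List Char))
    (h : l.length < fuel) :
    (PySem.Chars.splitOn.go [' '] fuel l cur acc).countP (fun w => !w.isEmpty)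
      = acc.countP (fun w => !w.isEmpty) + (if cur = [] then 0 else 1)
          + wcount (decide (cur ≠ [])) l := by
  induction fuel generalizing l cur acc with
  | zero => omega
  | succ f ih =>
    cases l with
    | nil =>
      show (List.countP _ ((cur.reverse :: acc).reverse)) = _
      rcases Decidable.em (cur = []) with hc | hc <;>
        simp [List.countP_reverse, hc, wcount]
    | cons c rest =>
      show (PySem.Chars.splitOn.go [' '] (f + 1) (c :: rest) cur acc).countP _ = _
      rw [PySem.Chars.splitOn.go]
      by_cases hc : c = ' '
      · have hpre : ([' '] : List Char).isPrefixOf (c :: rest) = true := by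
          simp [List.isPrefixOf, hc]
        rw [if_pos hpre]
        have := ih rest [] (cur.reverse :: acc) (by simpa using Nat.lt_of_succ_lt_succ h)
        rw [show List.drop ([' '] : List Char).length (c :: rest) = rest from rfl, this]
        rcases Decidable.em (cur = []) with h0 | h0 <;>
          simp [h0, wcount, hc]
      · have hpre : ([' '] : List Char).isPrefixOf (c :: rest) = false := by
          simp [List.isPrefixOf]
          exact fun he => (hc he.symm).elim
        rw [if_neg (by simp [hpre])]
        have := ih rest (c :: cur) acc (Nat.lt_of_succ_lt_succ h)
        rw [this]
        rcases Decidable.em (cur = []) with h0 | h0 <;> · simp [wcount, hc, h0]; try omega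

theorem split_wc (l : List Char) :
    (PySem.Chars.splitOn l [' ']).countP (fun w => !w.isEmpty) = wcount false l := by
  rw [PySem.Chars.splitOn, go_wc (l.length + 1) l [] [] (Nat.lt_succ_self _)]
  simp

theorem loopA (s : List Char) (k i : Nat) (w : Bool) (r : Int)
    (hk : s.length - 1 - i ≤ k) :
    (((PySem.List.pyRange (i : Int) ((s.length : Int) - 1) 1).foldl
        (fun (st : Bool × Int) j =>
          if PySem.List.pyGetD s j ' ' = ' ' ∧ PySem.List.pyGetD s (j + 1) ' ' ≠ ' '
          then (true, st.2 + 1) else (false, st.2))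
        (w, r)).2)
      = r + (pairs (s.drop i) : Int) := by
  induction k generalizing i w r with
  | zero =>
    have hge : (s.length : Int) - 1 ≤ (i : Int) := by omega
    rw [PySem.List.pyRange_one_eq_nil hge]
    have : pairs (s.drop i) = 0 := pairs_short _ (by simp; omega)
    simp [this]
  | succ k ih =>
    by_cases hlt : i + 1 < s.length
    · have hlt' : (i : Int) < (s.length : Int) - 1 := by omega
      rw [PySem.List.pyRange_one_cons hlt']
      have hi : i < s.length := by omega
      have hi1 : i + 1 < s.length := hlt
      have g0 : PySem.List.pyGetD s (i : Int) ' ' = s[i] := by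
        simp [PySem.List.pyGetD_natCast, List.getD_eq_getElem?_getD, hi]
      have g1 : PySem.List.pyGetD s ((i : Int) + 1) ' ' = s[i + 1] := by
        rw [PySem.List.pyGetD_eq_getElem s ' ' (by omega) (by omega)]
        simp only [show ((i : Int) + 1).toNat = i + 1 by omega]
      have hdrop : s.drop i = s[i] :: s.drop (i + 1) := List.drop_eq_getElem_cons hi
      have hdrop1 : s.drop (i + 1) = s[i + 1] :: s.drop (i + 2) := List.drop_eq_getElem_cons hi1
      simp only [List.foldl_cons, g0, g1]
      have hcast : ((i : Int) + 1) = ((i + 1 : Nat) : Int) := by push_cast; ring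
      by_cases hcond : s[i] = ' ' ∧ s[i + 1] ≠ ' '
      · rw [if_pos hcond]
        rw [hcast, ih (i + 1) true (r + 1) (by omega)]
        rw [hdrop, hdrop1, pairs, ← hdrop1, if_pos hcond]
        push_cast; ring
      · rw [if_neg hcond]
        rw [hcast, ih (i + 1) false r (by omega)]
        rw [hdrop, hdrop1, pairs, ← hdrop1, if_neg hcond]
        push_cast; ring
    · have hge : (s.length : Int) - 1 ≤ (i : Int) := by omega
      rw [PySem.List.pyRange_one_eq_nil hge]
      have : pairs (s.drop i) = 0 := pairs_short _ (by simp; omega)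
      simp [this]

theorem fold_wc (l : List Char) (w : Bool) (r : Int) :
    ((PySem.List.pyRange 0 ((([' '] ++ l ++ [' ']).length : Int) - 1) 1).foldl
        (fun (st : Bool × Int) i =>
          if PySem.List.pyGetD ([' '] ++ l ++ [' ']) i ' ' = ' '
             ∧ PySem.List.pyGetD ([' '] ++ l ++ [' ']) (i + 1) ' ' ≠ ' '
          then (true, st.2 + 1) else (false, st.2))
        (w, r)).2
      = r + (wcount false l : Int) := by
  have h := loopA ([' '] ++ l ++ [' ']) ([' '] ++ l ++ [' ']).length 0 w r (by omega)
  have hp : pairs (([' '] ++ l ++ [' ']).drop 0) = wcount false l := by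
    rw [List.drop_zero, show ([' '] ++ l ++ [' ']) = (' ' :: l ++ [' ']) from rfl, pairs_pad]
    norm_num
  rw [show ((0 : Nat) : Int) = (0 : Int) from rfl] at h
  rw [h, hp]

theorem count_eq_alt (a b : String) : count a b = count_alt a b := by
  unfold count count_alt
  show ((PySem.List.pyRange 0 ((([' '] ++ b.toList ++ [' ']).length : Int) - 1) 1).foldl
      (fun (st : Bool × Int) i =>
        if PySem.List.pyGetD ([' '] ++ b.toList ++ [' ']) i ' ' = ' '
           ∧ PySem.List.pyGetD ([' '] ++ b.toList ++ [' ']) (i + 1) ' ' ≠ ' '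
        then (true, st.2 + 1) else (false, st.2))
      ((PySem.List.pyRange 0 ((([' '] ++ a.toList ++ [' ']).length : Int) - 1) 1).foldl
        (fun (st : Bool × Int) i =>
          if PySem.List.pyGetD ([' '] ++ a.toList ++ [' ']) i ' ' = ' '
             ∧ PySem.List.pyGetD ([' '] ++ a.toList ++ [' ']) (i + 1) ' ' ≠ ' '
          then (true, st.2 + 1) else (false, st.2))
        (false, 0))).2 = _
  set st1 := ((PySem.List.pyRange 0 ((([' '] ++ a.toList ++ [' ']).length : Int) - 1) 1).foldl
        (fun (st : Bool × Int) i =>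
          if PySem.List.pyGetD ([' '] ++ a.toList ++ [' ']) i ' ' = ' '
             ∧ PySem.List.pyGetD ([' '] ++ a.toList ++ [' ']) (i + 1) ' ' ≠ ' '
          then (true, st.2 + 1) else (false, st.2))
        (false, 0)) with hst1
  obtain ⟨w1, r1⟩ := st1
  have hr1 : r1 = (wcount false a.toList : Int) := by
    have h := fold_wc a.toList false 0
    rw [← hst1] at h
    simpa using h
  rw [fold_wc b.toList w1 r1, hr1, split_wc, split_wc]

-- ===== VERDICT (by name: the statement is the Claim_ definition above) =====
theorem count_spec : Claim_equal_count := by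
  intro a b _
  unfold Spec_count
  exact count_eq_alt a b
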